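-- pv_equiv track=rewrite | github.com/dreamcomes-true/baekjoon | SWEA/D3/1208. ［S／W 문제해결 기본］ 1일차 － Flatten/［S／W 문제해결 기본］ 1일차 － Flatten.py | findHeightDiff
-- ===== SOURCE A (Python) =====
-- def findHeightDiff(dumpNumber, boxes) :
--     for i in range(dumpNumber) : # 총 덤프 횟수만큼 반복
--         maxHeight = max(boxes)
--         maxIndex = boxes.index(maxHeight)
--         minHeight = min(boxes)
--         minIndex = boxes.index(minHeight)
--
--         boxes[maxIndex] -= 1
--         boxes[minIndex] += 1
--
--     return max(boxes) - min(boxes)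
-- ===== SOURCE B (Python) =====
-- def findHeightDiff(dumpNumber, boxes):
--     # Counter-based water-levelling: O(n + min(k, total excess)) instead of A's O(k*n);
--     # does not mutate `boxes` (A levels it in place) -- return value is identical.
--     cnt = {}
--     for b in boxes:
--         cnt[b] = cnt.get(b, 0) + 1
--     lo = min(boxes)
--     hi = max(boxes)
--     for _ in range(dumpNumber):
--         if hi - lo <= 1:
--             break
--         cnt[hi] -= 1
--         cnt[hi - 1] = cnt.get(hi - 1, 0) + 1
--         cnt[lo] -= 1
--         cnt[lo + 1] = cnt.get(lo + 1, 0) + 1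
--         if cnt[hi] == 0:
--             del cnt[hi]
--             hi -= 1
--         if cnt[lo] == 0:
--             del cnt[lo]
--             lo += 1
--     return hi - lo
-- ===== Notes on version B (the rewrite author's own statement) =====
-- stated objective: faster
-- what changed: A rescans the whole list (max, index, min, index) on every one of the dumpNumber moves; B builds a height Counter once, tracks the current min/max and updates them in O(1) per move, and stops early once max-min <= 1 since further moves cannot change the answer; B also leaves `boxes` unmutated (A levels it in place) -- the return value is identical.
import Mathlib
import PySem

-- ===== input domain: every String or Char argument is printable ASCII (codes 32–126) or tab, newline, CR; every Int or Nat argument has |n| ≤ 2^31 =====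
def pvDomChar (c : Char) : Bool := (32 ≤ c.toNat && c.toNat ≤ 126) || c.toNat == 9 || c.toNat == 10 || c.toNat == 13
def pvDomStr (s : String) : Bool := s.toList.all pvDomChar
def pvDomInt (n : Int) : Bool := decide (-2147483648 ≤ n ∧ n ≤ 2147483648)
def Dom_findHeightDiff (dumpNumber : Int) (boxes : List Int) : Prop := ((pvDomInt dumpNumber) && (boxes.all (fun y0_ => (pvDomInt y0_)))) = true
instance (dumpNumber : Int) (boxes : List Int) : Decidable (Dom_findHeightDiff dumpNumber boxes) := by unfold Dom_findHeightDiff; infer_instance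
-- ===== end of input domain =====

-- B replaces A's per-move max/min/index scans of the list with a height Counter plus tracked
-- min/max and an early break once max-min ≤ 1 (further moves cannot change the answer);
-- equivalence is about the RETURN value only: A levels `boxes` in place, B does not mutate it.

-- ===== PORT A =====
-- one iteration of A's dump loop (max/index/min/index recomputed each pass, two in-place writes)
def pvStepA (l : List Int) : List Int :=
  let maxHeight := (PySem.List.max? l (fun x => x)).getD 0    -- max(boxes); raises on [] (excluded by Pre_)
  let maxIndex := (PySem.List.index? l maxHeight).getD 0      -- boxes.index(maxHeight); always found
  let minHeight := (PySem.List.min? l (fun x => x)).getD 0    -- min(boxes)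
  let minIndex := (PySem.List.index? l minHeight).getD 0      -- boxes.index(minHeight)
  let l1 := PySem.List.pySetD l (maxIndex : Int) (PySem.List.pyGetD l (maxIndex : Int) 0 - 1)
  PySem.List.pySetD l1 (minIndex : Int) (PySem.List.pyGetD l1 (minIndex : Int) 0 + 1)

def findHeightDiff (dumpNumber : Int) (boxes : List Int) : Int :=
  let final := (PySem.List.pyRange 0 dumpNumber 1).foldl (fun l _ => pvStepA l) boxes
  (PySem.List.max? final (fun x => x)).getD 0 - (PySem.List.min? final (fun x => x)).getD 0

-- ===== PORT B =====
-- the dump loop of Source B: fuel = number of remaining range iterations, `break` = return early.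
-- cnt[hi] -= 1 / cnt[lo] -= 1 are ported as insert of getD-1: exact, since the loop invariant
-- keeps both keys present (Python would only raise KeyError on an absent key).
def pvLoopB : Nat → PySem.Dict Int Int → Int → Int → Int × Int
  | 0, _, lo, hi => (lo, hi)
  | Nat.succ n, cnt, lo, hi =>
    if hi - lo ≤ 1 then (lo, hi)
    else
      let c1 := cnt.insert hi (cnt.getD hi 0 - 1)
      let c2 := c1.insert (hi - 1) (c1.getD (hi - 1) 0 + 1)
      let c3 := c2.insert lo (c2.getD lo 0 - 1)
      let c4 := c3.insert (lo + 1) (c3.getD (lo + 1) 0 + 1)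
      let p5 := if c4.getD hi 0 == 0 then (c4.erase hi, hi - 1) else (c4, hi)
      let p6 := if p5.1.getD lo 0 == 0 then (p5.1.erase lo, lo + 1) else (p5.1, lo)
      pvLoopB n p6.1 p6.2 p5.2

def findHeightDiff_alt (dumpNumber : Int) (boxes : List Int) : Int :=
  let cnt := boxes.foldl (fun d x => d.insert x (d.getD x 0 + 1)) PySem.Dict.empty
  let lo := (PySem.List.min? boxes (fun x => x)).getD 0    -- min(boxes); raises on [] (excluded by Pre_)
  let hi := (PySem.List.max? boxes (fun x => x)).getD 0
  let p := pvLoopB dumpNumber.toNat cnt lo hi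
  p.2 - p.1

-- ===== PRECONDITION & SPEC =====
-- Pre_ excludes only boxes = [], on which A raises ValueError (max() of empty sequence).
def Pre_findHeightDiff (dumpNumber : Int) (boxes : List Int) : Prop := boxes ≠ []
instance (dumpNumber : Int) (boxes : List Int) : Decidable (Pre_findHeightDiff dumpNumber boxes) := by unfold Pre_findHeightDiff; infer_instance

def pvWitness_findHeightDiff : Int × List Int := (3, [1, 4, 2])

def Spec_findHeightDiff (dumpNumber : Int) (boxes : List Int) (out : Int) : Prop := out = findHeightDiff_alt dumpNumber boxes
instance (dumpNumber : Int) (boxes : List Int) (out : Int) : Decidable (Spec_findHeightDiff dumpNumber boxes out) := by unfold Spec_findHeightDiff; infer_instance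

-- ===== CLAIM (what is proved, stated in full; the proofs are below) =====
def Claim_equal_findHeightDiff : Prop := ∀ (dumpNumber : Int) (boxes : List Int), Dom_findHeightDiff dumpNumber boxes → Pre_findHeightDiff dumpNumber boxes → Spec_findHeightDiff dumpNumber boxes (findHeightDiff dumpNumber boxes)

-- ===== LEMMAS AND PROOFS =====

-- the max? / min? of a list are characterised by membership plus a bound
theorem pv_max_eq {l : List Int} {hi : Int} (hm : hi ∈ l) (hb : ∀ v ∈ l, v ≤ hi) :
    PySem.List.max? l (fun x => x) = some hi := by
  cases h : PySem.List.max? l (fun x => x) with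
  | none =>
      rw [PySem.List.max?_eq_none_iff] at h
      subst h; cases hm
  | some M =>
      have h1 : M ≤ hi := hb M (PySem.List.max?_mem h)
      have h2 : hi ≤ M := PySem.List.max?_isMax h hi hm
      have h3 : M = hi := le_antisymm h1 h2
      rw [h3]

theorem pv_min_eq {l : List Int} {lo : Int} (hm : lo ∈ l) (hb : ∀ v ∈ l, lo ≤ v) :
    PySem.List.min? l (fun x => x) = some lo := by
  cases h : PySem.List.min? l (fun x => x) with
  | none =>
      rw [PySem.List.min?_eq_none_iff] at h
      subst h; cases hm
  | some m =>
      have h1 : lo ≤ m := hb m (PySem.List.min?_mem h)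
      have h2 : m ≤ lo := PySem.List.min?_isMin h lo hm
      have h3 : m = lo := le_antisymm h2 h1
      rw [h3]

-- Int-cast form of List.count_set (avoids Nat truncation in the step bookkeeping)
theorem pv_count_set_int (l : List Int) (n : Nat) (h : n < l.length) (x v : Int) :
    (((l.set n x).count v : Int)) =
      (l.count v : Int) - (if l[n] = v then 1 else 0) + (if x = v then 1 else 0) := by
  rw [List.count_set h]
  by_cases h1 : l[n] = v
  · have hpos : 0 < l.count v := List.count_pos_iff.mpr (h1 ▸ l.getElem_mem h)
    by_cases h2 : x = v <;> simp [h1, h2] <;> omega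
  · by_cases h2 : x = v <;> simp [h1, h2]

-- when all boxes are equal, A's step is a literal no-op on the list
theorem pv_stepA_eq_self {l : List Int} {M : Int}
    (hmax : PySem.List.max? l (fun x => x) = some M)
    (hmin : PySem.List.min? l (fun x => x) = some M) : pvStepA l = l := by
  have hMmem : M ∈ l := PySem.List.max?_mem hmax
  obtain ⟨i, hi⟩ := Option.isSome_iff_exists.mp ((PySem.List.index?_isSome_iff l M).mpr hMmem)
  obtain ⟨hilen, hgetM, _⟩ := PySem.List.getElem_of_index?_eq_some hi
  unfold pvStepA
  rw [hmax, hmin]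
  simp only [Option.getD_some, hi]
  rw [PySem.List.pySetD_natCast, PySem.List.pyGetD_natCast,
      PySem.List.pySetD_natCast, PySem.List.pyGetD_natCast]
  rw [List.getD_eq_getElem l 0 hilen, hgetM]
  rw [List.getD_eq_getElem _ 0 (by simpa using hilen), List.getElem_set_self (by simpa using hilen)]
  rw [List.set_set]
  have : M - 1 + 1 = M := by omega
  rw [this, ← hgetM, List.set_getElem_self]

-- how one step of A moves the counts: one box leaves level M, one leaves level m,
-- one arrives at M-1 and one at m+1 (as a single Int identity, valid for M ≠ m)
theorem pv_stepA_count {l : List Int} {M m : Int}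
    (hmax : PySem.List.max? l (fun x => x) = some M)
    (hmin : PySem.List.min? l (fun x => x) = some m) (hne : m ≠ M) (v : Int) :
    ((pvStepA l).count v : Int) =
      (l.count v : Int) - (if M = v then 1 else 0) + (if M - 1 = v then 1 else 0)
        - (if m = v then 1 else 0) + (if m + 1 = v then 1 else 0) := by
  have hMmem : M ∈ l := PySem.List.max?_mem hmax
  have hmmem : m ∈ l := PySem.List.min?_mem hmin
  obtain ⟨iM, hiM⟩ := Option.isSome_iff_exists.mp ((PySem.List.index?_isSome_iff l M).mpr hMmem)
  obtain ⟨im, him⟩ := Option.isSome_iff_exists.mp ((PySem.List.index?_isSome_iff l m).mpr hmmem)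
  obtain ⟨hMlen, hgetM, _⟩ := PySem.List.getElem_of_index?_eq_some hiM
  obtain ⟨hmlen, hgetm, _⟩ := PySem.List.getElem_of_index?_eq_some him
  have hidx : im ≠ iM := by
    intro h; subst h; rw [hgetM] at hgetm; exact hne hgetm.symm
  unfold pvStepA
  rw [hmax, hmin]
  simp only [Option.getD_some, hiM, him]
  rw [PySem.List.pySetD_natCast, PySem.List.pyGetD_natCast,
      PySem.List.pySetD_natCast, PySem.List.pyGetD_natCast]
  rw [List.getD_eq_getElem l 0 hMlen, hgetM]
  have hmlen' : im < (l.set iM (M - 1)).length := by simpa using hmlen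
  rw [List.getD_eq_getElem _ 0 hmlen', List.getElem_set_ne (Ne.symm hidx) hmlen', hgetm]
  rw [pv_count_set_int _ im (by simpa using hmlen) (m + 1) v]
  rw [List.getElem_set_ne (Ne.symm hidx) hmlen', hgetm]
  rw [pv_count_set_int l iM hMlen (M - 1) v, hgetM]

-- once max - min ≤ 1, A's step no longer changes any count
theorem pv_stepA_small {l : List Int} {lo hi : Int}
    (hmax : PySem.List.max? l (fun x => x) = some hi)
    (hmin : PySem.List.min? l (fun x => x) = some lo) (hgap : hi - lo ≤ 1) (v : Int) :
    (pvStepA l).count v = l.count v := by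
  by_cases heq : lo = hi
  · subst heq; rw [pv_stepA_eq_self hmax hmin]
  · have h := pv_stepA_count hmax hmin heq v
    have hlh : lo ≤ hi :=
      PySem.List.max?_isMax hmax lo (PySem.List.min?_mem hmin)
    have h1 : hi = lo + 1 := by omega
    subst h1
    have : ((pvStepA l).count v : Int) = (l.count v : Int) := by rw [h]; split_ifs <;> omega
    exact_mod_cast this

-- hence, once max - min ≤ 1, every further iterate keeps the same min and max
theorem pv_iter_small {l : List Int} {lo hi : Int}
    (hmax : PySem.List.max? l (fun x => x) = some hi)
    (hmin : PySem.List.min? l (fun x => x) = some lo) (hgap : hi - lo ≤ 1) (k : Nat) :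
    PySem.List.max? (pvStepA^[k] l) (fun x => x) = some hi ∧
      PySem.List.min? (pvStepA^[k] l) (fun x => x) = some lo := by
  induction k generalizing l with
  | zero => exact ⟨hmax, hmin⟩
  | succ k ih =>
      rw [Function.iterate_succ_apply]
      have hcnt : ∀ v, (pvStepA l).count v = l.count v := pv_stepA_small hmax hmin hgap
      have hmem : ∀ v : Int, v ∈ pvStepA l ↔ v ∈ l := by
        intro v
        rw [← List.count_pos_iff, ← List.count_pos_iff, hcnt]
      have hmax' : PySem.List.max? (pvStepA l) (fun x => x) = some hi :=
        pv_max_eq ((hmem hi).mpr (PySem.List.max?_mem hmax))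
          (fun v hv => PySem.List.max?_isMax hmax v ((hmem v).mp hv))
      have hmin' : PySem.List.min? (pvStepA l) (fun x => x) = some lo :=
        pv_min_eq ((hmem lo).mpr (PySem.List.min?_mem hmin))
          (fun v hv => PySem.List.min?_isMin hmin v ((hmem v).mp hv))
      exact ih hmax' hmin'

-- the dict-update chain of one pvLoopB iteration, named for the proofs
def pvC4 (c : PySem.Dict Int Int) (lo hi : Int) : PySem.Dict Int Int :=
  let c1 := c.insert hi (c.getD hi 0 - 1)
  let c2 := c1.insert (hi - 1) (c1.getD (hi - 1) 0 + 1)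
  let c3 := c2.insert lo (c2.getD lo 0 - 1)
  c3.insert (lo + 1) (c3.getD (lo + 1) 0 + 1)

-- getD after `del d[k]` (no such lemma in the PySem book)
theorem pv_find_filter (t : List (Int × Int)) (k v : Int) (h : v ≠ k) :
    List.find? (fun p => p.1 == v) (t.filter (fun p => !(p.1 == k))) =
      List.find? (fun p => p.1 == v) t := by
  induction t with
  | nil => rfl
  | cons p t ih =>
      rw [List.filter_cons]
      by_cases h1 : p.1 = k
      · have h2 : p.1 ≠ v := by rw [h1]; exact Ne.symm h
        rw [if_neg (by simp [h1])]
        rw [List.find?_cons_of_neg (by simp [h2]), ih]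
      · rw [if_pos (by simp [h1])]
        by_cases h2 : p.1 = v
        · rw [List.find?_cons_of_pos (by simp [h2]), List.find?_cons_of_pos (by simp [h2])]
        · rw [List.find?_cons_of_neg (by simp [h2]), List.find?_cons_of_neg (by simp [h2]), ih]

theorem pv_getD_erase (d : PySem.Dict Int Int) (k v d0 : Int) :
    (d.erase k).getD v d0 = if v = k then d0 else d.getD v d0 := by
  unfold PySem.Dict.erase PySem.Dict.getD PySem.Dict.get?
  by_cases hvk : v = k
  · subst hvk
    rw [if_pos rfl]
    have hnone : List.find? (fun p => p.1 == v) (d.items.filter (fun p => !(p.1 == v))) = none := by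
      rw [List.find?_eq_none]
      intro x hx
      simpa using (List.mem_filter.mp hx).2
    simp [hnone]
  · rw [if_neg hvk, pv_find_filter _ _ _ hvk]

-- the two 'count hit zero: drop the key, move the bound' steps, named for the proofs
def pvFst (c : PySem.Dict Int Int) (hi : Int) : PySem.Dict Int Int × Int :=
  if c.getD hi 0 == 0 then (c.erase hi, hi - 1) else (c, hi)

def pvSnd (c : PySem.Dict Int Int × Int) (lo : Int) : PySem.Dict Int Int × Int :=
  if c.1.getD lo 0 == 0 then (c.1.erase lo, lo + 1) else (c.1, lo)

theorem pvLoopB_succ (n : Nat) (c : PySem.Dict Int Int) (lo hi : Int) :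
    pvLoopB (n + 1) c lo hi =
      if hi - lo ≤ 1 then (lo, hi)
      else
        pvLoopB n
          (pvSnd (pvFst (pvC4 c lo hi) hi) lo).1
          (pvSnd (pvFst (pvC4 c lo hi) hi) lo).2
          (pvFst (pvC4 c lo hi) hi).2 := rfl

-- main loop correspondence: if the dict holds the counts of l and lo/hi are its min/max,
-- then pvLoopB returns exactly the min and max of A's n-fold iterate of l
theorem pv_loop_main (n : Nat) (l : List Int) (c : PySem.Dict Int Int) (lo hi : Int)
    (hc : ∀ v, c.getD v 0 = (l.count v : Int))
    (hlo : lo ∈ l) (hhi : hi ∈ l) (hb : ∀ v ∈ l, lo ≤ v ∧ v ≤ hi) :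
    PySem.List.min? (pvStepA^[n] l) (fun x => x) = some (pvLoopB n c lo hi).1 ∧
      PySem.List.max? (pvStepA^[n] l) (fun x => x) = some (pvLoopB n c lo hi).2 := by
  induction n generalizing l c lo hi with
  | zero =>
      exact ⟨pv_min_eq hlo (fun v hv => (hb v hv).1), pv_max_eq hhi (fun v hv => (hb v hv).2)⟩
  | succ n ih =>
      have hmax : PySem.List.max? l (fun x => x) = some hi :=
        pv_max_eq hhi (fun v hv => (hb v hv).2)
      have hmin : PySem.List.min? l (fun x => x) = some lo :=
        pv_min_eq hlo (fun v hv => (hb v hv).1)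
      rw [pvLoopB_succ]
      by_cases hgap : hi - lo ≤ 1
      · simp only [hgap, if_true]
        obtain ⟨h1, h2⟩ := pv_iter_small hmax hmin hgap (n + 1)
        exact ⟨h2, h1⟩
      · simp only [hgap, if_false]
        have hne : lo ≠ hi := by
          intro h; subst h; omega
        have hcnt := pv_stepA_count hmax hmin hne
        set l2 := pvStepA l with hl2
        -- counts of the updated dict match counts of the stepped list
        have hc4 : ∀ v, (pvC4 c lo hi).getD v 0 = (l2.count v : Int) := by
          intro v
          rw [hcnt v]
          unfold pvC4
          rcases eq_or_ne (hi - 1) (lo + 1) with h2 | h2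
          · simp only [PySem.Dict.getD_insert, hc, h2]
            split_ifs <;> (try subst v) <;> omega
          · simp only [PySem.Dict.getD_insert, hc]
            split_ifs <;> (try subst v) <;> omega
        -- membership in the stepped list, via its counts
        have hmem2 : ∀ v : Int, v ∈ l2 ↔ 0 < (l2.count v : Int) := by
          intro v; rw [← List.count_pos_iff]; exact_mod_cast Iff.rfl
        have hcl : (l.count hi : Int) ≥ 1 := by
          have := List.count_pos_iff.mpr hhi; omega
        have hcl' : (l.count lo : Int) ≥ 1 := by
          have := List.count_pos_iff.mpr hlo; omega
        have hub2 : ∀ v ∈ l2, v ≤ hi := by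
          intro v hv
          by_contra hgt
          have h0 : l.count v = 0 := by
            rw [List.count_eq_zero]
            intro hvl; have := (hb v hvl).2; omega
          have := (hmem2 v).mp hv
          rw [hcnt v] at this
          split_ifs at this <;> omega
        have hlb2 : ∀ v ∈ l2, lo ≤ v := by
          intro v hv
          by_contra hlt
          have h0 : l.count v = 0 := by
            rw [List.count_eq_zero]
            intro hvl; have := (hb v hvl).1; omega
          have := (hmem2 v).mp hv
          rw [hcnt v] at this
          split_ifs at this <;> omega
        -- point counts after the step
        have ehi : (l2.count hi : Int) = (l.count hi : Int) - 1 := by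
          have := hcnt hi; split_ifs at this <;> omega
        have ehi1 : 1 ≤ (l2.count (hi - 1) : Int) := by
          have := hcnt (hi - 1); split_ifs at this <;> omega
        have elo : (l2.count lo : Int) = (l.count lo : Int) - 1 := by
          have := hcnt lo; split_ifs at this <;> omega
        have elo1 : 1 ≤ (l2.count (lo + 1) : Int) := by
          have := hcnt (lo + 1); split_ifs at this <;> omega
        -- the updated hi / lo are again the max / min of the stepped list
        have hhiF : (if ((l2.count hi : Int) == 0) then hi - 1 else hi) ∈ l2 ∧
            ∀ v ∈ l2, v ≤ (if ((l2.count hi : Int) == 0) then hi - 1 else hi) := by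
          by_cases hz : (l2.count hi : Int) = 0
          · simp only [hz, beq_self_eq_true, if_true]
            refine ⟨(hmem2 _).mpr (by omega), fun v hv => ?_⟩
            have h1 := hub2 v hv
            have h2 : v ≠ hi := by
              intro h; subst h
              have := (hmem2 v).mp hv; omega
            omega
          · simp only [beq_iff_eq, hz, if_false]
            exact ⟨(hmem2 _).mpr (by omega), hub2⟩
        have hloF : (if ((l2.count lo : Int) == 0) then lo + 1 else lo) ∈ l2 ∧
            ∀ v ∈ l2, (if ((l2.count lo : Int) == 0) then lo + 1 else lo) ≤ v := by
          by_cases hz : (l2.count lo : Int) = 0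
          · simp only [hz, beq_self_eq_true, if_true]
            refine ⟨(hmem2 _).mpr (by omega), fun v hv => ?_⟩
            have h1 := hlb2 v hv
            have h2 : v ≠ lo := by
              intro h; subst h
              have := (hmem2 v).mp hv; omega
            omega
          · simp only [beq_iff_eq, hz, if_false]
            exact ⟨(hmem2 _).mpr (by omega), hlb2⟩
        -- counts survive the two possible key deletions (the deleted value is 0)
        have hc5 : ∀ v, (pvFst (pvC4 c lo hi) hi).1.getD v 0 = (l2.count v : Int) := by
          intro v
          unfold pvFst
          rw [hc4 hi]
          by_cases hz : (l2.count hi : Int) = 0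
          · simp only [hz, beq_self_eq_true, if_true, pv_getD_erase]
            split_ifs with h
            · subst h; omega
            · exact hc4 v
          · simp only [beq_iff_eq, hz, if_false]
            exact hc4 v
        have hc6 : ∀ v, (pvSnd (pvFst (pvC4 c lo hi) hi) lo).1.getD v 0 = (l2.count v : Int) := by
          intro v
          unfold pvSnd
          rw [hc5 lo]
          by_cases hz : (l2.count lo : Int) = 0
          · simp only [hz, beq_self_eq_true, if_true, pv_getD_erase]
            split_ifs with h
            · subst h; omega
            · exact hc5 v
          · simp only [beq_iff_eq, hz, if_false]
            exact hc5 v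
        have e2 : (pvFst (pvC4 c lo hi) hi).2 = (if ((l2.count hi : Int) == 0) then hi - 1 else hi) := by
          unfold pvFst
          rw [hc4 hi]
          split_ifs <;> rfl
        have e3 : (pvSnd (pvFst (pvC4 c lo hi) hi) lo).2 = (if ((l2.count lo : Int) == 0) then lo + 1 else lo) := by
          unfold pvSnd
          rw [hc5 lo]
          split_ifs <;> rfl
        rw [Function.iterate_succ_apply, e2, e3]
        exact ih l2 _ _ _ hc6 hloF.1 hhiF.1
          (fun v hv => ⟨hloF.2 v hv, hhiF.2 v hv⟩)

-- fold of a constant-step function over any index list is function iteration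
theorem pv_foldl_iterate {α β : Type} (f : α → α) (L : List β) (x : α) :
    L.foldl (fun a _ => f a) x = f^[L.length] x := by
  induction L generalizing x with
  | nil => rfl
  | cons b L ih => simp [List.foldl_cons, ih, Function.iterate_succ_apply]

-- ===== VERDICT (by name: the statement is the Claim_ definition above) =====
theorem findHeightDiff_spec : Claim_equal_findHeightDiff := by
  intro dumpNumber boxes _ hpre
  unfold Spec_findHeightDiff findHeightDiff findHeightDiff_alt
  cases hmin : PySem.List.min? boxes (fun x => x) with
  | none => exact absurd ((PySem.List.min?_eq_none_iff boxes _).mp hmin) hpre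
  | some lo =>
    cases hmax : PySem.List.max? boxes (fun x => x) with
    | none => exact absurd ((PySem.List.max?_eq_none_iff boxes _).mp hmax) hpre
    | some hi =>
      have hc0 : ∀ v, (boxes.foldl (fun d x => d.insert x (d.getD x 0 + 1))
          (PySem.Dict.empty : PySem.Dict Int Int)).getD v 0 = (boxes.count v : Int) := by
        intro v
        rw [PySem.Dict.getD_foldl_insert_add_one, PySem.Dict.getD_empty]
        simp [List.count]
      obtain ⟨h1, h2⟩ := pv_loop_main dumpNumber.toNat boxes _ lo hi hc0
        (PySem.List.min?_mem hmin) (PySem.List.max?_mem hmax)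
        (fun v hv => ⟨PySem.List.min?_isMin hmin v hv, PySem.List.max?_isMax hmax v hv⟩)
      have hlen : (PySem.List.pyRange 0 dumpNumber 1).length = dumpNumber.toNat := by
        simp [pysem]
      rw [pv_foldl_iterate pvStepA (PySem.List.pyRange 0 dumpNumber 1) boxes, hlen]
      simp only [h1, h2, Option.getD_some]
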